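-- pv_equiv track=rewrite | github.com/nermadie/CodeForces_Solutions | CodeforcesRound903Div3/prob04.py | is_possible_to_equalize
-- ===== SOURCE A (Python) =====
-- from collections import Counter
--
-- def find_divisors(number):
--     divisors = []
--     temp_number = number
--     i = 2
--     while number != 1 and i <= temp_number:
--         while True:
--             if number % i == 0:
--                 divisors.append(i)
--                 number //= i
--             else:
--                 break
--         i += 1
--     return divisors
--
-- def is_possible_to_equalize(n, arr):
--     divisors = []
--     for i in range(n):
--         divisors.extend(find_divisors(arr[i]))
--     counter = Counter(divisors)
--     elements = counter.elements()
--     for element in elements: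
--         if counter[element] % n != 0:
--             return "NO"
--     return "YES"
-- ===== SOURCE B (Python) =====
-- from collections import Counter
--
-- def prime_factors(v):
--     fs = []
--     d = 2
--     while d * d <= v:
--         while v % d == 0:
--             fs.append(d)
--             v //= d
--         d += 1
--     if v > 1:
--         fs.append(v)
--     return fs
--
-- def is_possible_to_equalize(n, arr):
--     counts = Counter()
--     for i in range(n):
--         counts.update(prime_factors(arr[i]))
--     return "YES" if all(c % n == 0 for c in counts.values()) else "NO"
-- ===== Notes on version B (the rewrite author's own statement) =====
-- stated objective: faster
-- what changed: Factorization by trial division only up to sqrt(value) with the remaining prime cofactor appended once, instead of A's scan of every candidate divisor up to the value itself; counts are accumulated in one Counter and checked with a single all() over its values instead of iterating Counter.elements().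
import Mathlib
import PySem

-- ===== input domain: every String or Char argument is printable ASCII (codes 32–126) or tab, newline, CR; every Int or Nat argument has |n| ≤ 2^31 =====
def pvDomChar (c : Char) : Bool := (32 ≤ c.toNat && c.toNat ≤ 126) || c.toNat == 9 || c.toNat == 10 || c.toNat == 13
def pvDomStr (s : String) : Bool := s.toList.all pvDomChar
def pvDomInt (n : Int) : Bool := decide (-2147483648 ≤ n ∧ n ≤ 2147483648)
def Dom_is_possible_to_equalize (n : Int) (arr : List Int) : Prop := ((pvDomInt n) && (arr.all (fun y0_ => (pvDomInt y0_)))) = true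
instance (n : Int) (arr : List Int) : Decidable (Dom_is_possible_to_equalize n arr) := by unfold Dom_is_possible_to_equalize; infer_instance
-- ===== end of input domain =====

-- B factorizes by trial division only up to sqrt(value) (appending the remaining prime cofactor once)
-- instead of A's scan of every candidate up to the value, and checks the counter with one all-pass
-- instead of iterating Counter.elements(); objective: faster.

-- ===== PORT A =====
-- inner `while True: if number % i == 0: divisors.append(i); number //= i else: break` of find_divisors;
-- all reachable values are nonnegative, so the Python ints live in Nat (// = Nat division there).
-- The guards 2 ≤ i, 1 ≤ v only make the recursion total; they hold on every reachable call.
def fdInner (v i : Nat) : List Nat × Nat :=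
  if _h : 2 ≤ i ∧ 1 ≤ v ∧ v % i = 0 then
    let r := fdInner (v / i) i
    (i :: r.1, r.2)
  else ([], v)
termination_by v
decreasing_by exact Nat.div_lt_self (by omega) (by omega)

-- outer `while number != 1 and i <= temp_number` loop of find_divisors
def fdOuter (v i temp : Nat) : List Nat :=
  if _h : v ≠ 1 ∧ i ≤ temp then
    let p := fdInner v i
    p.1 ++ fdOuter p.2 (i + 1) temp
  else []
termination_by temp + 1 - i
decreasing_by omega

-- find_divisors(number); for number ≤ 1 (incl. negatives) the Python loop body never runs and [] is returned,
-- which is exactly fdOuter on number.toNat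
def find_divisors (number : Int) : List Int :=
  (fdOuter number.toNat 2 number.toNat).map Int.ofNat

def is_possible_to_equalize (n : Int) (arr : List Int) : String :=
  -- for i in range(n): divisors.extend(find_divisors(arr[i]))   (arr[i] in range under Pre_)
  let divisors := (PySem.List.pyRange 0 n 1).foldl
      (fun acc i => acc ++ find_divisors (PySem.List.pyGetD arr i 0)) []
  -- counter = Counter(divisors)
  let counter := PySem.Dict.counter divisors
  -- elements = counter.elements()  (every stored count is positive here)
  let elements := counter.items.flatMap (fun kc => List.replicate kc.2.toNat kc.1)
  -- for element in elements: if counter[element] % n != 0: return "NO"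
  if elements.any (fun e => !(PySem.Int.mod (counter.getD e 0) n == 0)) then "NO" else "YES"

-- ===== PORT B =====
-- inner `while v % d == 0: fs.append(d); v //= d` of prime_factors, with the fs accumulator
def pfInner (v d : Nat) (fs : List Nat) : List Nat × Nat :=
  if _h : 2 ≤ d ∧ 1 ≤ v ∧ v % d = 0 then
    pfInner (v / d) d (fs ++ [d])
  else (fs, v)
termination_by v
decreasing_by exact Nat.div_lt_self (by omega) (by omega)

-- needed by pfOuter's termination proof
theorem pfInner_snd_le (v d : Nat) (fs : List Nat) : (pfInner v d fs).2 ≤ v := by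
  rw [pfInner]
  split
  · exact le_trans (pfInner_snd_le (v / d) d (fs ++ [d])) (Nat.div_le_self v d)
  · exact le_refl v
termination_by v
decreasing_by exact Nat.div_lt_self (by omega) (by omega)

-- outer `while d * d <= v` loop of prime_factors, then `if v > 1: fs.append(v)`
def pfOuter (v d : Nat) (fs : List Nat) : List Nat :=
  if _h : 2 ≤ d ∧ d * d ≤ v then
    let p := pfInner v d fs
    pfOuter p.2 (d + 1) p.1
  else if 1 < v then fs ++ [v] else fs
termination_by v + 1 - d
decreasing_by
  have h1 := pfInner_snd_le v d fs
  have h2 : d ≤ d * d := Nat.le_mul_of_pos_left d (by omega)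
  omega

-- prime_factors(v); for v ≤ 1 (incl. negatives) neither Python loop nor the final append runs
def prime_factors (v : Int) : List Int :=
  (pfOuter v.toNat 2 []).map Int.ofNat

def is_possible_to_equalize_alt (n : Int) (arr : List Int) : String :=
  -- for i in range(n): counts.update(prime_factors(arr[i]))   (arr[i] in range under Pre_)
  let counts := (PySem.List.pyRange 0 n 1).foldl
      (fun d i => (prime_factors (PySem.List.pyGetD arr i 0)).foldl
        (fun d x => d.modify x 0 (· + 1)) d) PySem.Dict.empty
  -- "YES" if all(c % n == 0 for c in counts.values()) else "NO"
  if counts.items.all (fun kc => PySem.Int.mod kc.2 n == 0) then "YES" else "NO"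

-- ===== PRECONDITION & SPEC =====
-- A raises IndexError on arr[i] exactly when n > len(arr); those inputs are excluded.
def Pre_is_possible_to_equalize (n : Int) (arr : List Int) : Prop := n ≤ (arr.length : Int)
instance (n : Int) (arr : List Int) : Decidable (Pre_is_possible_to_equalize n arr) := by
  unfold Pre_is_possible_to_equalize; infer_instance

def pvWitness_is_possible_to_equalize : Int × List Int := (2, [6, 6])

def Spec_is_possible_to_equalize (n : Int) (arr : List Int) (out : String) : Prop :=
  out = is_possible_to_equalize_alt n arr
instance (n : Int) (arr : List Int) (out : String) : Decidable (Spec_is_possible_to_equalize n arr out) := by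
  unfold Spec_is_possible_to_equalize; infer_instance

-- ===== CLAIM (what is proved, stated in full; the proofs are below) =====
def Claim_equal_is_possible_to_equalize : Prop := ∀ (n : Int) (arr : List Int), Dom_is_possible_to_equalize n arr → Pre_is_possible_to_equalize n arr → Spec_is_possible_to_equalize n arr (is_possible_to_equalize n arr)


-- ===== LEMMAS AND PROOFS =====

-- A's inner loop divides out all factors i, appending one i per division
theorem fdInner_spec (v i : Nat) (hi : 2 ≤ i) (hv : 1 ≤ v) :
    ∃ k m, fdInner v i = (List.replicate k i, m) ∧ v = i ^ k * m ∧ ¬ i ∣ m ∧ 1 ≤ m := by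
  rw [fdInner]
  by_cases h : v % i = 0
  · rw [dif_pos ⟨hi, hv, h⟩]
    have hdvd : i ∣ v := Nat.dvd_of_mod_eq_zero h
    have hle : i ≤ v := Nat.le_of_dvd (by omega) hdvd
    have hv' : 1 ≤ v / i := Nat.one_le_div_iff (by omega) |>.mpr hle
    obtain ⟨k, m, h1, h2, h3, h4⟩ := fdInner_spec (v / i) i hi hv'
    refine ⟨k + 1, m, by simp [h1, List.replicate_succ], ?_, h3, h4⟩
    have : i * (v / i) = v := Nat.mul_div_cancel' hdvd
    rw [pow_succ]
    calc v = i * (v / i) := this.symm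
    _ = i * (i ^ k * m) := by rw [h2]
    _ = i ^ k * i * m := by ring
  · rw [dif_neg (by tauto)]
    exact ⟨0, v, by simp, by simp, fun hd => h (Nat.mod_eq_zero_of_dvd hd), hv⟩
termination_by v
decreasing_by exact Nat.div_lt_self (by omega) (by omega)

-- B's inner loop does the same, onto the accumulator
theorem pfInner_spec (v d : Nat) (fs : List Nat) (hd : 2 ≤ d) (hv : 1 ≤ v) :
    ∃ k m, pfInner v d fs = (fs ++ List.replicate k d, m) ∧ v = d ^ k * m ∧ ¬ d ∣ m ∧ 1 ≤ m := by
  rw [pfInner]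
  by_cases h : v % d = 0
  · rw [dif_pos ⟨hd, hv, h⟩]
    have hdvd : d ∣ v := Nat.dvd_of_mod_eq_zero h
    have hle : d ≤ v := Nat.le_of_dvd (by omega) hdvd
    have hv' : 1 ≤ v / d := Nat.one_le_div_iff (by omega) |>.mpr hle
    obtain ⟨k, m, h1, h2, h3, h4⟩ := pfInner_spec (v / d) d (fs ++ [d]) hd hv'
    refine ⟨k + 1, m, ?_, ?_, h3, h4⟩
    · rw [h1, List.append_assoc, List.replicate_succ]; rfl
    · have : d * (v / d) = v := Nat.mul_div_cancel' hdvd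
      rw [pow_succ]
      calc v = d * (v / d) := this.symm
      _ = d * (d ^ k * m) := by rw [h2]
      _ = d ^ k * d * m := by ring
  · rw [dif_neg (by tauto)]
    refine ⟨0, v, by simp, by simp, fun hdvd => h (Nat.mod_eq_zero_of_dvd hdvd), hv⟩
termination_by v
decreasing_by exact Nat.div_lt_self (by omega) (by omega)

-- peeling k copies of the least prime p off the front of the factor list
theorem primeFactorsList_pow_mul (p : Nat) (hp : p.Prime) (k m : Nat) (hm : 1 ≤ m)
    (hsmall : ∀ j, 2 ≤ j → j < p → ¬ j ∣ m) :
    (p ^ k * m).primeFactorsList = List.replicate k p ++ m.primeFactorsList := by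
  induction k with
  | zero => simp
  | succ k ih =>
    have hp2 := hp.two_le
    have hn2 : 2 ≤ p ^ (k + 1) * m := by
      have : p ≤ p ^ (k + 1) := Nat.le_self_pow (by omega) p
      calc 2 ≤ p := hp2
      _ ≤ p ^ (k + 1) := this
      _ = p ^ (k + 1) * 1 := (mul_one _).symm
      _ ≤ p ^ (k + 1) * m := Nat.mul_le_mul_left _ hm
    have hpdvd : p ∣ p ^ (k + 1) * m := Dvd.dvd.mul_right (dvd_pow_self p (by omega)) m
    have hmin : (p ^ (k + 1) * m).minFac = p := by
      apply le_antisymm (Nat.minFac_le_of_dvd hp2 hpdvd)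
      by_contra hlt
      rw [not_le] at hlt
      have hq : (p ^ (k + 1) * m).minFac.Prime := Nat.minFac_prime (by omega)
      have hqd : (p ^ (k + 1) * m).minFac ∣ p ^ (k + 1) * m := Nat.minFac_dvd _
      rcases (hq.dvd_mul).mp hqd with h | h
      · have := (Nat.prime_dvd_prime_iff_eq hq hp).mp (hq.dvd_of_dvd_pow h)
        omega
      · exact hsmall _ hq.two_le hlt h
    obtain ⟨t, ht⟩ : ∃ t, p ^ (k + 1) * m = t + 2 := ⟨p ^ (k + 1) * m - 2, by omega⟩
    have hdiv : (p ^ (k + 1) * m) / p = p ^ k * m := by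
      have : p ^ (k + 1) * m = p * (p ^ k * m) := by ring
      rw [this, Nat.mul_div_cancel_left _ (by omega)]
    rw [ht, Nat.primeFactorsList_add_two, ← ht, hmin, hdiv, ih, List.replicate_succ]
    simp

-- A's outer loop from a state with no factor below i computes the whole factor list
theorem fdOuter_eq (fuel : Nat) : ∀ (v i temp : Nat), temp + 1 - i ≤ fuel → 2 ≤ i → 1 ≤ v →
    v ≤ temp → (∀ j, 2 ≤ j → j < i → ¬ j ∣ v) → fdOuter v i temp = v.primeFactorsList := by
  induction fuel with
  | zero =>
    intro v i temp hf h2 hv hvt hns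
    -- i > temp forces v = 1 (its least factor would be < i otherwise)
    have hv1 : v = 1 := by
      by_contra hne
      have hmf := Nat.minFac_prime hne
      have := Nat.minFac_le (show 0 < v by omega)
      exact hns v.minFac hmf.two_le (by omega) (Nat.minFac_dvd v)
    rw [fdOuter, dif_neg (by simp [hv1]), hv1, Nat.primeFactorsList_one]
  | succ fuel ih =>
    intro v i temp hf h2 hv hvt hns
    by_cases hc : v ≠ 1 ∧ i ≤ temp
    · rw [fdOuter, dif_pos hc]
      obtain ⟨k, m, h1, h2', h3, h4⟩ := fdInner_spec v i h2 hv
      simp only [h1]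
      cases k with
      | zero =>
        simp only [pow_zero, one_mul] at h2'
        subst h2'
        rw [List.replicate, List.nil_append]
        exact ih v (i + 1) temp (by omega) (by omega) hv hvt
          (fun j hj1 hj2 hjd => by
            rcases Nat.lt_succ_iff_lt_or_eq.mp hj2 with h | h
            · exact hns j hj1 h hjd
            · exact h3 (h ▸ hjd))
      | succ k =>
        have hidvd : i ∣ v := by rw [h2', pow_succ]; exact ⟨i ^ k * m, by ring⟩
        have hiprime : i.Prime := by
          rw [Nat.prime_def_lt]
          refine ⟨h2, fun a ha had => ?_⟩
          by_contra hane
          have ha2 : 2 ≤ a := by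
            have : 0 < a := Nat.pos_of_dvd_of_pos had (by omega)
            omega
          exact hns a ha2 (by omega) (had.trans hidvd)
        have hmdvd : m ∣ v := ⟨i ^ (k + 1), by rw [h2']; ring⟩
        have hsmall : ∀ j, 2 ≤ j → j < i → ¬ j ∣ m :=
          fun j hj1 hj2 hjd => hns j hj1 hj2 (hjd.trans hmdvd)
        have hrec := ih m (i + 1) temp (by omega) (by omega) h4
          (le_trans (Nat.le_of_dvd (by omega) hmdvd) hvt)
          (fun j hj1 hj2 hjd => by
            rcases Nat.lt_succ_iff_lt_or_eq.mp hj2 with h | h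
            · exact hsmall j hj1 h hjd
            · exact h3 (h ▸ hjd))
        rw [hrec, h2', primeFactorsList_pow_mul i hiprime (k + 1) m h4 hsmall]
    · rw [fdOuter, dif_neg hc]
      rw [not_and_or, not_not, not_le] at hc
      by_cases hv1 : v = 1
      · rw [hv1, Nat.primeFactorsList_one]
      · exfalso
        have hmf := Nat.minFac_prime hv1
        have hle := Nat.minFac_le (show 0 < v by omega)
        have := hc.resolve_left hv1
        exact hns v.minFac hmf.two_le (by omega) (Nat.minFac_dvd v)

-- B's outer loop: same invariant, stopping at sqrt with a prime cofactor
theorem pfOuter_eq (fuel : Nat) : ∀ (v d : Nat) (fs : List Nat), v + 1 - d ≤ fuel → 2 ≤ d →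
    1 ≤ v → (∀ j, 2 ≤ j → j < d → ¬ j ∣ v) → pfOuter v d fs = fs ++ v.primeFactorsList := by
  induction fuel with
  | zero =>
    intro v d fs hf h2 hv hns
    have hdd : ¬ (2 ≤ d ∧ d * d ≤ v) := by
      have : d ≤ d * d := Nat.le_mul_of_pos_left d (by omega)
      omega
    rw [pfOuter, dif_neg hdd]
    have hv1 : v = 1 := by
      by_contra hne
      have hmf := Nat.minFac_prime hne
      have := Nat.minFac_le (show 0 < v by omega)
      exact hns v.minFac hmf.two_le (by omega) (Nat.minFac_dvd v)
    rw [if_neg (by omega), hv1, Nat.primeFactorsList_one, List.append_nil]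
  | succ fuel ih =>
    intro v d fs hf h2 hv hns
    by_cases hc : 2 ≤ d ∧ d * d ≤ v
    · rw [pfOuter, dif_pos hc]
      obtain ⟨k, m, h1, h2', h3, h4⟩ := pfInner_spec v d fs h2 hv
      simp only [h1]
      have hdlev : d ≤ v := le_trans (Nat.le_mul_of_pos_left d (by omega)) hc.2
      cases k with
      | zero =>
        simp only [pow_zero, one_mul] at h2'
        subst h2'
        rw [List.replicate, List.append_nil]
        exact ih v (d + 1) fs (by omega) (by omega) hv
          (fun j hj1 hj2 hjd => by
            rcases Nat.lt_succ_iff_lt_or_eq.mp hj2 with h | h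
            · exact hns j hj1 h hjd
            · exact h3 (h ▸ hjd))
      | succ k =>
        have hddvd : d ∣ v := by rw [h2', pow_succ]; exact ⟨d ^ k * m, by ring⟩
        have hdprime : d.Prime := by
          rw [Nat.prime_def_lt]
          refine ⟨h2, fun a ha had => ?_⟩
          by_contra hane
          have ha2 : 2 ≤ a := by
            have : 0 < a := Nat.pos_of_dvd_of_pos had (by omega)
            omega
          exact hns a ha2 (by omega) (had.trans hddvd)
        have hmdvd : m ∣ v := ⟨d ^ (k + 1), by rw [h2']; ring⟩
        have hmlev : m ≤ v := Nat.le_of_dvd (by omega) hmdvd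
        have hsmall : ∀ j, 2 ≤ j → j < d → ¬ j ∣ m :=
          fun j hj1 hj2 hjd => hns j hj1 hj2 (hjd.trans hmdvd)
        have hrec := ih m (d + 1) (fs ++ List.replicate (k + 1) d) (by omega) (by omega) h4
          (fun j hj1 hj2 hjd => by
            rcases Nat.lt_succ_iff_lt_or_eq.mp hj2 with h | h
            · exact hsmall j hj1 h hjd
            · exact h3 (h ▸ hjd))
        rw [hrec, h2', primeFactorsList_pow_mul d hdprime (k + 1) m h4 hsmall,
          List.append_assoc]
    · rw [pfOuter, dif_neg hc]
      have hvdd : v < d * d := by omega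
      by_cases hv1 : 1 < v
      · rw [if_pos hv1]
        have hvprime : v.Prime := by
          by_contra hnp
          have hsq := Nat.minFac_sq_le_self (show 0 < v by omega) hnp
          have hmf := Nat.minFac_prime (show v ≠ 1 by omega)
          have hdle : d ≤ v.minFac := by
            by_contra hlt
            exact hns v.minFac hmf.two_le (by omega) (Nat.minFac_dvd v)
          have : d * d ≤ v.minFac * v.minFac :=
            Nat.mul_le_mul hdle hdle
          rw [pow_two] at hsq
          omega
        rw [Nat.primeFactorsList_prime hvprime]
      · rw [if_neg hv1]
        have hv1' : v = 1 := by omega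
        rw [hv1', Nat.primeFactorsList_one, List.append_nil]

-- the two factorizers agree on every int
theorem find_divisors_eq_prime_factors (v : Int) : find_divisors v = prime_factors v := by
  unfold find_divisors prime_factors
  congr 1
  match hv : v.toNat with
  | 0 =>
    rw [fdOuter, dif_neg (by omega), pfOuter, dif_neg (by omega), if_neg (by omega)]
  | Nat.succ w =>
    rw [fdOuter_eq (w + 2) (w + 1) 2 (w + 1) (by omega) (by omega) (by omega) (by omega)
        (fun j hj1 hj2 _ => by omega),
      pfOuter_eq (w + 2) (w + 1) 2 [] (by omega) (by omega) (by omega)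
        (fun j hj1 hj2 _ => by omega)]
    simp

-- A's elements() scan flags a bad count iff B's all() fails, over the same counter
theorem any_elements_eq_not_all (L : List Int) (n : Int) :
    ((PySem.Dict.counter L).items.flatMap (fun kc => List.replicate kc.2.toNat kc.1)).any
      (fun e => !(PySem.Int.mod ((PySem.Dict.counter L).getD e 0) n == 0))
    = !((PySem.Dict.counter L).items.all (fun kc => PySem.Int.mod kc.2 n == 0)) := by
  rw [PySem.Dict.items_counter, List.flatMap_map, List.any_flatMap, List.all_map,
    Bool.eq_iff_iff]
  simp only [List.any_eq_true, List.any_replicate, Bool.not_eq_true', List.all_eq_false,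
    Function.comp_apply, PySem.Dict.getD_counter]
  constructor
  · rintro ⟨k, hk, hke⟩
    refine ⟨k, hk, ?_⟩
    have hcnt : 0 < L.count k := List.count_pos_iff.mpr ((PySem.Set.mem_ofList L k).mp hk)
    rw [if_neg (by simp; omega)] at hke
    simpa using hke
  · rintro ⟨k, hk, hke⟩
    refine ⟨k, hk, ?_⟩
    have hcnt : 0 < L.count k := List.count_pos_iff.mpr ((PySem.Set.mem_ofList L k).mp hk)
    rw [if_neg (by simp; omega)]
    simpa using hke

-- ===== VERDICT (by name: the statement is the Claim_ definition above) =====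
theorem is_possible_to_equalize_spec : Claim_equal_is_possible_to_equalize := by
  intro n arr _ _
  unfold Spec_is_possible_to_equalize is_possible_to_equalize is_possible_to_equalize_alt
  dsimp only
  have hdiv : (PySem.List.pyRange 0 n 1).foldl
      (fun acc i => acc ++ find_divisors (PySem.List.pyGetD arr i 0)) []
      = (PySem.List.pyRange 0 n 1).flatMap
        (fun i => prime_factors (PySem.List.pyGetD arr i 0)) := by
    rw [PySem.List.foldl_append_eq_flatMap]
    simp only [List.nil_append]
    congr 1
    funext i
    exact find_divisors_eq_prime_factors _
  rw [hdiv, ← List.foldl_flatMap, ← PySem.Dict.counter_eq_foldl, any_elements_eq_not_all]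
  cases h : ((PySem.Dict.counter ((PySem.List.pyRange 0 n 1).flatMap
      (fun i => prime_factors (PySem.List.pyGetD arr i 0)))).items.all
      (fun kc => PySem.Int.mod kc.2 n == 0)) <;> rfl
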